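-- pv_equiv track=rewrite | github.com/scottbrough/bughunting | agents/reporting.py | generate_statistics
-- ===== SOURCE A (Python) =====
-- def generate_statistics(findings, chains):
--     """Generate statistics for the report."""
--     # Count findings by severity
--     critical_count = sum(1 for f in findings if f.get("severity", "").lower() == "critical")
--     high_count = sum(1 for f in findings if f.get("severity", "").lower() == "high")
--     medium_count = sum(1 for f in findings if f.get("severity", "").lower() == "medium")
--     low_count = sum(1 for f in findings if f.get("severity", "").lower() == "low")
--     info_count = sum(1 for f in findings if f.get("severity", "").lower() == "info")
--
--     # Count chains by severity
--     critical_chains = sum(1 for c in chains if c.get("severity", "").lower() == "critical")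
--     high_chains = sum(1 for c in chains if c.get("severity", "").lower() == "high")
--     medium_chains = sum(1 for c in chains if c.get("severity", "").lower() == "medium")
--     low_chains = sum(1 for c in chains if c.get("severity", "").lower() == "low")
--
--     # Calculate weighted risk score
--     risk_score = critical_count * 10 + high_count * 5 + medium_count * 2 + low_count * 1
--
--     return {
--         "total_findings": len(findings),
--         "critical_count": critical_count,
--         "high_count": high_count,
--         "medium_count": medium_count,
--         "low_count": low_count,
--         "info_count": info_count,
--         "total_chains": len(chains),
--         "critical_chains": critical_chains,
--         "high_chains": high_chains,
--         "medium_chains": medium_chains,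
--         "low_chains": low_chains,
--         "risk_score": risk_score
--     }
-- ===== SOURCE B (Python) =====
-- def generate_statistics(findings, chains):
--     """Generate statistics for the report (single tally pass per input list)."""
--     ftab = {}
--     for f in findings:
--         s = f.get("severity", "").lower()
--         ftab[s] = ftab.get(s, 0) + 1
--     ctab = {}
--     for c in chains:
--         s = c.get("severity", "").lower()
--         ctab[s] = ctab.get(s, 0) + 1
--
--     critical = ftab.get("critical", 0)
--     high = ftab.get("high", 0)
--     medium = ftab.get("medium", 0)
--     low = ftab.get("low", 0)
--
--     return {
--         "total_findings": len(findings),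
--         "critical_count": critical,
--         "high_count": high,
--         "medium_count": medium,
--         "low_count": low,
--         "info_count": ftab.get("info", 0),
--         "total_chains": len(chains),
--         "critical_chains": ctab.get("critical", 0),
--         "high_chains": ctab.get("high", 0),
--         "medium_chains": ctab.get("medium", 0),
--         "low_chains": ctab.get("low", 0),
--         "risk_score": critical * 10 + high * 5 + medium * 2 + low * 1
--     }
-- ===== Notes on version B (the rewrite author's own statement) =====
-- stated objective: simpler
-- what changed: Replaces A's nine separate filtered scans (one per severity level) with one tally pass over findings and one over chains that build severity->count tables, from which all counts and the risk score are read with default 0.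
import Mathlib
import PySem

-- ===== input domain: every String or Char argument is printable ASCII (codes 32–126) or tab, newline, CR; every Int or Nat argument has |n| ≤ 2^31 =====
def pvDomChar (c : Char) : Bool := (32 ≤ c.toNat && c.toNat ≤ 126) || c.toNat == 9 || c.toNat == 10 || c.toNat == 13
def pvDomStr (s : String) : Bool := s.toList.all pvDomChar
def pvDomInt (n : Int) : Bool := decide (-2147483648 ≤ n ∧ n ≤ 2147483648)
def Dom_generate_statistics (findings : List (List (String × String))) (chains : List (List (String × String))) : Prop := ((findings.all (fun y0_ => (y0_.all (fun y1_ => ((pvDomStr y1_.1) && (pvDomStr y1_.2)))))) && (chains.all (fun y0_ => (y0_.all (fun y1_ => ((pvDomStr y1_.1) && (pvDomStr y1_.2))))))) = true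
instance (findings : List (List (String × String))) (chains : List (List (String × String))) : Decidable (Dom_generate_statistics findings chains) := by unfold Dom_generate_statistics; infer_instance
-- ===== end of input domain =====

-- ===== PORT A =====
-- B changes A's nine filtered scans into two single-pass severity tallies (objective: simpler).
-- shared helper: f.get("severity", "").lower()  (first-match lookup on the association list)
def pvSev (f : List (String × String)) : String :=
  PySem.Str.lower ((List.lookup "severity" f).getD "")

def generate_statistics (findings : List (List (String × String))) (chains : List (List (String × String))) : List (String × Int) :=
  let critical_count := findings.foldl (fun acc f => if pvSev f == "critical" then acc + 1 else acc) (0 : Int)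
  let high_count := findings.foldl (fun acc f => if pvSev f == "high" then acc + 1 else acc) (0 : Int)
  let medium_count := findings.foldl (fun acc f => if pvSev f == "medium" then acc + 1 else acc) (0 : Int)
  let low_count := findings.foldl (fun acc f => if pvSev f == "low" then acc + 1 else acc) (0 : Int)
  let info_count := findings.foldl (fun acc f => if pvSev f == "info" then acc + 1 else acc) (0 : Int)
  let critical_chains := chains.foldl (fun acc c => if pvSev c == "critical" then acc + 1 else acc) (0 : Int)
  let high_chains := chains.foldl (fun acc c => if pvSev c == "high" then acc + 1 else acc) (0 : Int)
  let medium_chains := chains.foldl (fun acc c => if pvSev c == "medium" then acc + 1 else acc) (0 : Int)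
  let low_chains := chains.foldl (fun acc c => if pvSev c == "low" then acc + 1 else acc) (0 : Int)
  let risk_score := critical_count * 10 + high_count * 5 + medium_count * 2 + low_count * 1
  [("total_findings", (findings.length : Int)),
   ("critical_count", critical_count),
   ("high_count", high_count),
   ("medium_count", medium_count),
   ("low_count", low_count),
   ("info_count", info_count),
   ("total_chains", (chains.length : Int)),
   ("critical_chains", critical_chains),
   ("high_chains", high_chains),
   ("medium_chains", medium_chains),
   ("low_chains", low_chains),
   ("risk_score", risk_score)]

-- ===== PORT B =====
def generate_statistics_alt (findings : List (List (String × String))) (chains : List (List (String × String))) : List (String × Int) :=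
  let ftab := findings.foldl (fun d f => d.insert (pvSev f) (d.getD (pvSev f) 0 + 1)) (PySem.Dict.empty : PySem.Dict String Int)
  let ctab := chains.foldl (fun d c => d.insert (pvSev c) (d.getD (pvSev c) 0 + 1)) (PySem.Dict.empty : PySem.Dict String Int)
  let critical := ftab.getD "critical" 0
  let high := ftab.getD "high" 0
  let medium := ftab.getD "medium" 0
  let low := ftab.getD "low" 0
  [("total_findings", (findings.length : Int)),
   ("critical_count", critical),
   ("high_count", high),
   ("medium_count", medium),
   ("low_count", low),
   ("info_count", ftab.getD "info" 0),
   ("total_chains", (chains.length : Int)),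
   ("critical_chains", ctab.getD "critical" 0),
   ("high_chains", ctab.getD "high" 0),
   ("medium_chains", ctab.getD "medium" 0),
   ("low_chains", ctab.getD "low" 0),
   ("risk_score", critical * 10 + high * 5 + medium * 2 + low * 1)]

-- ===== PRECONDITION & SPEC =====
def Spec_generate_statistics (findings : List (List (String × String))) (chains : List (List (String × String))) (out : List (String × Int)) : Prop := out = generate_statistics_alt findings chains
instance (findings : List (List (String × String))) (chains : List (List (String × String))) (out : List (String × Int)) : Decidable (Spec_generate_statistics findings chains out) := by unfold Spec_generate_statistics; infer_instance

-- ===== CLAIM (what is proved, stated in full; the proofs are below) =====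
def Claim_equal_generate_statistics : Prop := ∀ (findings : List (List (String × String))) (chains : List (List (String × String))), Dom_generate_statistics findings chains → Spec_generate_statistics findings chains (generate_statistics findings chains)

-- ===== LEMMAS AND PROOFS =====
-- B's tally table read at key v is the number of rows whose severity is v
theorem pvTab_getD (l : List (List (String × String))) (d : PySem.Dict String Int) (v : String) :
    (l.foldl (fun d f => d.insert (pvSev f) (d.getD (pvSev f) 0 + 1)) d).getD v 0
    = d.getD v 0 + ((l.countP (fun f => pvSev f == v) : Nat) : Int) := by
  induction l generalizing d with
  | nil => simp
  | cons f t ih =>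
    simp only [List.foldl_cons, ih, List.countP_cons]
    rw [PySem.Dict.getD_insert]
    by_cases h : v = pvSev f
    · have hb : (pvSev f == v) = true := beq_iff_eq.mpr h.symm
      rw [if_pos h, hb, if_pos rfl, h]
      omega
    · have hb : (pvSev f == v) = false := beq_eq_false_iff_ne.mpr (fun e => h e.symm)
      rw [if_neg h, hb, if_neg Bool.false_ne_true]
      omega

theorem pvEmpty_getD (v : String) : (PySem.Dict.empty : PySem.Dict String Int).getD v 0 = 0 := rfl

-- ===== VERDICT (by name: the statement is the Claim_ definition above) =====
theorem generate_statistics_spec : Claim_equal_generate_statistics := by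
  intro findings chains _
  unfold Spec_generate_statistics generate_statistics generate_statistics_alt
  simp only [pvTab_getD, pvEmpty_getD, PySem.List.foldl_count_if, zero_add]
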